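-- pv_equiv track=rewrite | github.com/DoriniTT/PS-TEROS | teros/core/vasp_parallelization/utils.py | generate_kpar_values
-- ===== SOURCE A (Python) =====
-- import math
--
-- def get_divisors(n: int) -> list[int]:
--     """Get all divisors of n in ascending order.
--
--     Args:
--         n: Positive integer to find divisors for.
--
--     Returns:
--         List of all divisors of n, sorted ascending.
--
--     Example:
--         >>> get_divisors(12)
--         [1, 2, 3, 4, 6, 12]
--     """
--     if n <= 0:
--         return []
--     divisors = []
--     for i in range(1, int(math.sqrt(n)) + 1):
--         if n % i == 0:
--             divisors.append(i)
--             if i != n // i: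
--                 divisors.append(n // i)
--     return sorted(divisors)
--
-- def generate_kpar_values(
--     num_kpoints: int,
--     num_procs: int,
--     max_kpar: int | None = None,
-- ) -> list[int]:
--     """Generate sensible KPAR values for benchmarking.
--
--     KPAR determines the number of k-point groups for parallelization.
--     It must divide both the number of k-points and the number of MPI processes.
--     Effective when num_kpoints >= num_procs.
--
--     Args:
--         num_kpoints: Total number of k-points in the calculation.
--         num_procs: Total number of MPI processes available.
--         max_kpar: Maximum KPAR value to consider. Defaults to min(num_kpoints, num_procs).
--
--     Returns:
--         List of KPAR values to test, sorted ascending.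
--
--     Example:
--         >>> generate_kpar_values(num_kpoints=16, num_procs=8)
--         [1, 2, 4, 8]
--         >>> generate_kpar_values(num_kpoints=10, num_procs=8)
--         [1, 2]
--     """
--     if num_kpoints <= 0 or num_procs <= 0:
--         return [1]
--
--     if max_kpar is None:
--         max_kpar = min(num_kpoints, num_procs)
--
--     # Get divisors of both
--     kpoint_divisors = set(get_divisors(num_kpoints))
--     proc_divisors = set(get_divisors(num_procs))
--
--     # KPAR must divide both
--     common_divisors = kpoint_divisors.intersection(proc_divisors)
--
--     # Filter by max_kpar
--     kpar_values = sorted([d for d in common_divisors if d <= max_kpar])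
--
--     if not kpar_values:
--         return [1]
--
--     return kpar_values
-- ===== SOURCE B (Python) =====
-- import math
--
-- def generate_kpar_values(num_kpoints, num_procs, max_kpar=None):
--     if num_kpoints <= 0 or num_procs <= 0:
--         return [1]
--     if max_kpar is None:
--         max_kpar = min(num_kpoints, num_procs)
--     # Common divisors of both counts are exactly the divisors of their gcd.
--     g = math.gcd(num_kpoints, num_procs)
--     small = []
--     large = []
--     for i in range(1, math.isqrt(g) + 1):
--         if g % i == 0:
--             if i <= max_kpar:
--                 small.append(i)
--             j = g // i
--             if j != i and j <= max_kpar: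
--                 large.append(j)
--     result = small + large[::-1]
--     return result or [1]
-- ===== Notes on version B (the rewrite author's own statement) =====
-- stated objective: faster
-- what changed: B computes gcd(num_kpoints, num_procs) and enumerates divisor pairs of the gcd in one scan up to its integer square root (small divisors ascending, large cofactors collected and reversed), instead of A's building two full divisor lists, set-intersecting them and sorting.
import Mathlib
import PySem

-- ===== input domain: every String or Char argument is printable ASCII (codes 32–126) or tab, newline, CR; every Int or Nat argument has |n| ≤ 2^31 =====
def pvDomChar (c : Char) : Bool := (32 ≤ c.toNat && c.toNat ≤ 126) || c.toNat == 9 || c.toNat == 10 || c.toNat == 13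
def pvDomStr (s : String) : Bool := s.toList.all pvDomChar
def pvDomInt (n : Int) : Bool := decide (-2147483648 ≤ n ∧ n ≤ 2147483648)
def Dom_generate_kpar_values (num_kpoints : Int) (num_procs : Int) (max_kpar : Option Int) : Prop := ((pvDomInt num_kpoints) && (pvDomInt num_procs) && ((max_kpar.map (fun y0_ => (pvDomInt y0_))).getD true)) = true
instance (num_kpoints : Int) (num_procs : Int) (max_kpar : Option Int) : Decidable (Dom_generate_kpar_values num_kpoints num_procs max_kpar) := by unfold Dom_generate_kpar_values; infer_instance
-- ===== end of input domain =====

-- B replaces A's two divisor-set builds + set intersection + sort by one divisor-pair scan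
-- of gcd(num_kpoints, num_procs) up to its integer square root: a single O(sqrt gcd) scan in place of A's two O(sqrt n) scans.

-- ===== PORT A =====
-- int(math.sqrt n) is ported as Nat.sqrt n.toNat: exact for 0 < n ≤ 2^31, where the
-- correctly-rounded double sqrt truncates to the integer square root.
def get_divisors (n : Int) : List Int :=
  if n ≤ 0 then []
  else
    let divisors : List Int :=
      (PySem.List.pyRange 1 ((Nat.sqrt n.toNat : Int) + 1) 1).foldl
        (fun acc i =>
          if PySem.Int.mod n i = 0 then
            if i ≠ PySem.Int.floordiv n i then acc ++ [i] ++ [PySem.Int.floordiv n i]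
            else acc ++ [i]
          else acc) []
    PySem.List.sorted divisors (fun x => x) false

def generate_kpar_values (num_kpoints : Int) (num_procs : Int) (max_kpar : Option Int) : List Int :=
  if num_kpoints ≤ 0 ∨ num_procs ≤ 0 then [1]
  else
    let mk : Int := max_kpar.getD (min num_kpoints num_procs)
    let kpoint_divisors : PySem.Set Int := PySem.Set.ofList (get_divisors num_kpoints)
    let proc_divisors : PySem.Set Int := PySem.Set.ofList (get_divisors num_procs)
    let common_divisors : PySem.Set Int := PySem.Set.inter kpoint_divisors proc_divisors
    -- [d for d in common_divisors if d <= max_kpar] consumed by a key-less sorted: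
    -- the result does not depend on the set's iteration order
    let kpar_values : List Int :=
      PySem.List.sorted (common_divisors.filter (fun d => d ≤ mk)) (fun x => x) false
    if kpar_values = [] then [1] else kpar_values

-- ===== PORT B =====
def generate_kpar_values_alt (num_kpoints : Int) (num_procs : Int) (max_kpar : Option Int) : List Int :=
  if num_kpoints ≤ 0 ∨ num_procs ≤ 0 then [1]
  else
    let mk : Int := max_kpar.getD (min num_kpoints num_procs)
    let g : Int := (Int.gcd num_kpoints num_procs : Int)   -- math.gcd
    let p : List Int × List Int :=
      (PySem.List.pyRange 1 ((Nat.sqrt g.toNat : Int) + 1) 1).foldl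
        (fun sl i =>
          if PySem.Int.mod g i = 0 then
            (if i ≤ mk then sl.1 ++ [i] else sl.1,
             if PySem.Int.floordiv g i ≠ i ∧ PySem.Int.floordiv g i ≤ mk
             then sl.2 ++ [PySem.Int.floordiv g i] else sl.2)
          else sl) ([], [])
    let result : List Int := p.1 ++ p.2.reverse   -- small + list(reversed(large))
    if result = [] then [1] else result

-- ===== PRECONDITION & SPEC =====
def Spec_generate_kpar_values (num_kpoints : Int) (num_procs : Int) (max_kpar : Option Int) (out : List Int) : Prop := out = generate_kpar_values_alt num_kpoints num_procs max_kpar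
instance (num_kpoints : Int) (num_procs : Int) (max_kpar : Option Int) (out : List Int) : Decidable (Spec_generate_kpar_values num_kpoints num_procs max_kpar out) := by unfold Spec_generate_kpar_values; infer_instance

-- ===== CLAIM (what is proved, stated in full; the proofs are below) =====
def Claim_equal_generate_kpar_values : Prop := ∀ (num_kpoints : Int) (num_procs : Int) (max_kpar : Option Int), Dom_generate_kpar_values num_kpoints num_procs max_kpar → Spec_generate_kpar_values num_kpoints num_procs max_kpar (generate_kpar_values num_kpoints num_procs max_kpar)

-- ===== LEMMAS AND PROOFS =====

-- A's append loop, rewritten as a flatMap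
theorem getdiv_foldl_eq (n : Int) (l : List Int) :
    l.foldl (fun acc i =>
        if PySem.Int.mod n i = 0 then
          if i ≠ PySem.Int.floordiv n i then acc ++ [i] ++ [PySem.Int.floordiv n i]
          else acc ++ [i]
        else acc) []
    = l.flatMap (fun i =>
        if PySem.Int.mod n i = 0 then
          if i ≠ PySem.Int.floordiv n i then [i, PySem.Int.floordiv n i] else [i]
        else []) := by
  have h : (fun (acc : List Int) i =>
        if PySem.Int.mod n i = 0 then
          if i ≠ PySem.Int.floordiv n i then acc ++ [i] ++ [PySem.Int.floordiv n i]
          else acc ++ [i]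
        else acc)
      = fun acc i => acc ++ (if PySem.Int.mod n i = 0 then
          if i ≠ PySem.Int.floordiv n i then [i, PySem.Int.floordiv n i] else [i]
        else []) := by
    funext acc i; split_ifs <;> simp
  rw [h, PySem.List.foldl_append_eq_flatMap]; simp

-- the two square-root bracket inequalities, cast to Int
theorem sqrt_bounds (g : Int) (hg : 0 < g) :
    (Nat.sqrt g.toNat : Int) * (Nat.sqrt g.toNat : Int) ≤ g ∧
      g < ((Nat.sqrt g.toNat : Int) + 1) * ((Nat.sqrt g.toNat : Int) + 1) := by
  have h : (g.toNat : Int) = g := Int.toNat_of_nonneg hg.le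
  have h1 := Nat.sqrt_le' g.toNat
  have h2 := Nat.lt_succ_sqrt' g.toNat
  zify at h1 h2
  rw [h] at h1 h2
  refine ⟨by nlinarith, by nlinarith⟩

-- the cofactor g // d of a positive divisor d of g > 0
theorem div_pair {g d : Int} (hg : 0 < g) (hdvd : d ∣ g) (h1 : 1 ≤ d) :
    PySem.Int.floordiv g d * d = g ∧ 1 ≤ PySem.Int.floordiv g d ∧
      PySem.Int.floordiv g d ∣ g := by
  have hdpos : 0 < d := h1
  rw [PySem.Int.floordiv_eq_ediv_of_pos hdpos]
  have hmul : g / d * d = g := Int.ediv_mul_cancel hdvd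
  have hpos : 0 < g / d := by
    by_contra hq; push Not at hq
    nlinarith [hmul]
  exact ⟨hmul, hpos, ⟨d, hmul.symm⟩⟩

-- a divisor above the square root has cofactor at most the square root
theorem cofactor_le_sqrt {g d : Int} (hg : 0 < g) (hdvd : d ∣ g)
    (hs : (Nat.sqrt g.toNat : Int) < d) :
    PySem.Int.floordiv g d ≤ (Nat.sqrt g.toNat : Int) := by
  have hsnn : (0:Int) ≤ (Nat.sqrt g.toNat : Int) := Int.natCast_nonneg _
  obtain ⟨hmul, hq1, _⟩ := div_pair hg hdvd (by omega)
  obtain ⟨_, h2⟩ := sqrt_bounds g hg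
  by_contra h; push Not at h
  nlinarith [hmul]

-- a divisor at most the square root with a distinct cofactor has cofactor above the square root
theorem cofactor_gt_sqrt {g i : Int} (hg : 0 < g) (hdvd : i ∣ g) (hi1 : 1 ≤ i)
    (his : i ≤ (Nat.sqrt g.toNat : Int)) (hne : PySem.Int.floordiv g i ≠ i) :
    (Nat.sqrt g.toNat : Int) < PySem.Int.floordiv g i := by
  obtain ⟨hmul, hq1, _⟩ := div_pair hg hdvd hi1
  obtain ⟨h1, h2⟩ := sqrt_bounds g hg
  set s : Int := (Nat.sqrt g.toNat : Int) with hsdef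
  set q : Int := PySem.Int.floordiv g i with hqdef
  by_contra h; push Not at h
  have hgss : g = s * s := by nlinarith
  have hieq : i = s := by
    by_contra hilt
    have : i < s := lt_of_le_of_ne his hilt
    nlinarith
  have hqeq : q = s := by nlinarith
  exact hne (by omega)

-- membership in get_divisors: exactly the positive divisors
theorem mem_get_divisors {n : Int} (hn : 0 < n) (d : Int) :
    d ∈ get_divisors n ↔ d ∣ n ∧ 1 ≤ d := by
  have hsnn : (0:Int) ≤ (Nat.sqrt n.toNat : Int) := Int.natCast_nonneg _
  obtain ⟨hs1, hs2⟩ := sqrt_bounds n hn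
  unfold get_divisors
  rw [if_neg (by omega)]
  simp only [PySem.List.mem_sorted, getdiv_foldl_eq, List.mem_flatMap]
  constructor
  · rintro ⟨i, hi, hd⟩
    rw [PySem.List.mem_pyRange_one] at hi
    have hipos : 0 < i := hi.1
    by_cases hm : PySem.Int.mod n i = 0
    · have hdvd : i ∣ n := (PySem.Int.mod_eq_zero_iff_dvd n i).mp hm
      obtain ⟨hmul, hq1, hqdvd⟩ := div_pair hn hdvd hi.1
      rw [if_pos hm] at hd
      by_cases hne : i ≠ PySem.Int.floordiv n i
      · rw [if_pos hne] at hd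
        simp only [List.mem_cons, List.not_mem_nil, or_false] at hd
        rcases hd with rfl | rfl
        · exact ⟨hdvd, hi.1⟩
        · exact ⟨hqdvd, hq1⟩
      · rw [if_neg hne] at hd
        simp only [List.mem_cons, List.not_mem_nil, or_false] at hd
        subst hd
        exact ⟨hdvd, hi.1⟩
    · rw [if_neg hm] at hd
      simp at hd
  · rintro ⟨hdvd, hd1⟩
    by_cases hds : d ≤ (Nat.sqrt n.toNat : Int)
    · refine ⟨d, ?_, ?_⟩
      · rw [PySem.List.mem_pyRange_one]; omega
      · have hm : PySem.Int.mod n d = 0 := (PySem.Int.mod_eq_zero_iff_dvd n d).mpr hdvd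
        rw [if_pos hm]
        by_cases hne : d ≠ PySem.Int.floordiv n d
        · rw [if_pos hne]; simp
        · rw [if_neg hne]; simp
    · push Not at hds
      obtain ⟨hmul, hc1, hcdvd⟩ := div_pair hn hdvd hd1
      set c : Int := PySem.Int.floordiv n d with hcdef
      have hcs : c ≤ (Nat.sqrt n.toNat : Int) := cofactor_le_sqrt hn hdvd hds
      refine ⟨c, ?_, ?_⟩
      · rw [PySem.List.mem_pyRange_one]; omega
      · have hcdvd' : c ∣ n := hcdvd
        have hm : PySem.Int.mod n c = 0 := (PySem.Int.mod_eq_zero_iff_dvd n c).mpr hcdvd'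
        rw [if_pos hm]
        have hcpos : 0 < c := hc1
        have hfd : PySem.Int.floordiv n c = d := by
          rw [PySem.Int.floordiv_eq_ediv_of_pos hcpos, ← hmul, mul_comm]
          exact Int.mul_ediv_cancel d (by omega)
        have hne : c ≠ PySem.Int.floordiv n c := by rw [hfd]; omega
        rw [if_pos hne, hfd]; simp

-- B's pair-accumulator loop, split into a filter and a filter-map
theorem bfold_eq (g mk : Int) (l : List Int) (a b : List Int) :
    l.foldl (fun sl i =>
        if PySem.Int.mod g i = 0 then
          (if i ≤ mk then sl.1 ++ [i] else sl.1,
           if PySem.Int.floordiv g i ≠ i ∧ PySem.Int.floordiv g i ≤ mk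
           then sl.2 ++ [PySem.Int.floordiv g i] else sl.2)
        else sl) (a, b)
    = (a ++ l.filter (fun i => decide (PySem.Int.mod g i = 0 ∧ i ≤ mk)),
       b ++ (l.filter (fun i => decide (PySem.Int.mod g i = 0 ∧
              (PySem.Int.floordiv g i ≠ i ∧ PySem.Int.floordiv g i ≤ mk)))).map
            (fun i => PySem.Int.floordiv g i)) := by
  induction l generalizing a b with
  | nil => simp
  | cons x xs ih =>
    rw [List.foldl_cons]
    by_cases h1 : PySem.Int.mod g x = 0 <;>
      by_cases h2 : x ≤ mk <;>
        by_cases h3 : PySem.Int.floordiv g x ≠ x ∧ PySem.Int.floordiv g x ≤ mk <;>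
          simp [h1, h2, h3, ih]

-- the two pre-fallback lists of A and B coincide
theorem kv_eq (nk np mk : Int) (hk : 0 < nk) (hp : 0 < np) :
    PySem.List.sorted
      (List.filter (fun d => decide (d ≤ mk))
        (PySem.Set.inter (PySem.Set.ofList (get_divisors nk))
          (PySem.Set.ofList (get_divisors np)))) (fun x => x) false
    = (PySem.List.pyRange 1 ((Nat.sqrt ((Int.gcd nk np : Int)).toNat : Int) + 1) 1).filter
        (fun i => decide (PySem.Int.mod (Int.gcd nk np : Int) i = 0 ∧ i ≤ mk))
      ++ (((PySem.List.pyRange 1 ((Nat.sqrt ((Int.gcd nk np : Int)).toNat : Int) + 1) 1).filter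
            (fun i => decide (PySem.Int.mod (Int.gcd nk np : Int) i = 0 ∧
              (PySem.Int.floordiv (Int.gcd nk np : Int) i ≠ i ∧
                PySem.Int.floordiv (Int.gcd nk np : Int) i ≤ mk)))).map
          (fun i => PySem.Int.floordiv (Int.gcd nk np : Int) i)).reverse := by
  set g : Int := (Int.gcd nk np : Int) with hgdef
  have hg : 0 < g := by
    have : Int.gcd nk np ≠ 0 := by
      rw [Ne, Int.gcd_eq_zero_iff]; rintro ⟨h1, h2⟩; omega
    rw [hgdef]
    exact_mod_cast Nat.pos_of_ne_zero this
  set s : Int := (Nat.sqrt g.toNat : Int) with hsdef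
  have hsnn : (0:Int) ≤ s := Int.natCast_nonneg _
  have hdvd_iff : ∀ d : Int, d ∣ g ↔ d ∣ nk ∧ d ∣ np := by
    intro d
    rw [hgdef]
    constructor
    · intro h; exact ⟨h.trans (Int.gcd_dvd_left nk np), h.trans (Int.gcd_dvd_right nk np)⟩
    · rintro ⟨h1, h2⟩
      have hnat : d.natAbs ∣ Nat.gcd nk.natAbs np.natAbs :=
        Nat.dvd_gcd (Int.natAbs_dvd_natAbs.mpr h1) (Int.natAbs_dvd_natAbs.mpr h2)
      exact Int.natAbs_dvd.mp (Int.natCast_dvd_natCast.mpr hnat)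
  -- membership of A's filtered intersection
  have hmemA : ∀ d : Int,
      d ∈ List.filter (fun d => decide (d ≤ mk))
            (PySem.Set.inter (PySem.Set.ofList (get_divisors nk))
              (PySem.Set.ofList (get_divisors np)))
        ↔ d ∣ g ∧ 1 ≤ d ∧ d ≤ mk := by
    intro d
    rw [List.mem_filter, PySem.Set.mem_inter, PySem.Set.mem_ofList, PySem.Set.mem_ofList,
      mem_get_divisors hk, mem_get_divisors hp, hdvd_iff]
    simp only [decide_eq_true_eq]
    tauto
  -- membership of B's small ++ reversed large
  have hmemB : ∀ d : Int,
      d ∈ (PySem.List.pyRange 1 (s + 1) 1).filter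
            (fun i => decide (PySem.Int.mod g i = 0 ∧ i ≤ mk))
          ++ (((PySem.List.pyRange 1 (s + 1) 1).filter
                (fun i => decide (PySem.Int.mod g i = 0 ∧
                  (PySem.Int.floordiv g i ≠ i ∧ PySem.Int.floordiv g i ≤ mk)))).map
              (fun i => PySem.Int.floordiv g i)).reverse
        ↔ d ∣ g ∧ 1 ≤ d ∧ d ≤ mk := by
    intro d
    rw [List.mem_append, List.mem_reverse, List.mem_map]
    simp only [List.mem_filter, PySem.List.mem_pyRange_one, decide_eq_true_eq]
    constructor
    · rintro (⟨⟨hi1, hi2⟩, hm, hmk⟩ | ⟨i, ⟨⟨hi1, hi2⟩, hm, hne, hmk⟩, rfl⟩)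
      · exact ⟨(PySem.Int.mod_eq_zero_iff_dvd g d).mp hm, hi1, hmk⟩
      · have hdvd : i ∣ g := (PySem.Int.mod_eq_zero_iff_dvd g i).mp hm
        obtain ⟨_, hq1, hqdvd⟩ := div_pair hg hdvd hi1
        exact ⟨hqdvd, hq1, hmk⟩
    · rintro ⟨hdvd, hd1, hdmk⟩
      by_cases hds : d ≤ s
      · exact Or.inl ⟨⟨hd1, by omega⟩, (PySem.Int.mod_eq_zero_iff_dvd g d).mpr hdvd, hdmk⟩
      · push Not at hds
        obtain ⟨hmul, hc1, hcdvd⟩ := div_pair hg hdvd hd1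
        set c : Int := PySem.Int.floordiv g d with hcdef
        have hcs : c ≤ s := cofactor_le_sqrt hg hdvd hds
        have hfd : PySem.Int.floordiv g c = d := by
          rw [PySem.Int.floordiv_eq_ediv_of_pos hc1, ← hmul, mul_comm]
          exact Int.mul_ediv_cancel d (by omega)
        refine Or.inr ⟨c, ⟨⟨hc1, by omega⟩,
          (PySem.Int.mod_eq_zero_iff_dvd g c).mpr hcdvd, ?_, by rw [hfd]; exact hdmk⟩, hfd⟩
        rw [hfd]; omega
  -- B's list is strictly increasing
  have hpairB :
      ((PySem.List.pyRange 1 (s + 1) 1).filter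
          (fun i => decide (PySem.Int.mod g i = 0 ∧ i ≤ mk))
        ++ (((PySem.List.pyRange 1 (s + 1) 1).filter
              (fun i => decide (PySem.Int.mod g i = 0 ∧
                (PySem.Int.floordiv g i ≠ i ∧ PySem.Int.floordiv g i ≤ mk)))).map
            (fun i => PySem.Int.floordiv g i)).reverse).Pairwise (· < ·) := by
    rw [List.pairwise_append]
    have hsmall : ∀ x ∈ (PySem.List.pyRange 1 (s + 1) 1).filter
        (fun i => decide (PySem.Int.mod g i = 0 ∧ i ≤ mk)), 1 ≤ x ∧ x ≤ s := by
      intro x hx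
      rw [List.mem_filter, PySem.List.mem_pyRange_one] at hx
      omega
    have hlarge : ∀ y ∈ ((PySem.List.pyRange 1 (s + 1) 1).filter
          (fun i => decide (PySem.Int.mod g i = 0 ∧
            (PySem.Int.floordiv g i ≠ i ∧ PySem.Int.floordiv g i ≤ mk)))).map
        (fun i => PySem.Int.floordiv g i), s < y := by
      intro y hy
      rw [List.mem_map] at hy
      obtain ⟨i, hi, rfl⟩ := hy
      rw [List.mem_filter, PySem.List.mem_pyRange_one] at hi
      obtain ⟨⟨hi1, hi2⟩, hcond⟩ := hi
      rw [decide_eq_true_eq] at hcond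
      exact cofactor_gt_sqrt hg ((PySem.Int.mod_eq_zero_iff_dvd g i).mp hcond.1)
        hi1 (by omega) hcond.2.1
    refine ⟨?_, ?_, ?_⟩
    · exact List.Pairwise.sublist List.filter_sublist (PySem.List.pairwise_lt_pyRange_one 1 (s+1))
    · rw [List.pairwise_reverse, List.pairwise_map]
      have hbase : ((PySem.List.pyRange 1 (s + 1) 1).filter
          (fun i => decide (PySem.Int.mod g i = 0 ∧
            (PySem.Int.floordiv g i ≠ i ∧ PySem.Int.floordiv g i ≤ mk)))).Pairwise (· < ·) :=
        List.Pairwise.sublist List.filter_sublist (PySem.List.pairwise_lt_pyRange_one 1 (s+1))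
      refine List.Pairwise.imp_of_mem ?_ hbase
      intro i j hi hj hij
      rw [List.mem_filter, PySem.List.mem_pyRange_one] at hi hj
      obtain ⟨⟨hi1, _⟩, hic⟩ := hi
      obtain ⟨⟨hj1, _⟩, hjc⟩ := hj
      rw [decide_eq_true_eq] at hic hjc
      have hidvd : i ∣ g := (PySem.Int.mod_eq_zero_iff_dvd g i).mp hic.1
      have hjdvd : j ∣ g := (PySem.Int.mod_eq_zero_iff_dvd g j).mp hjc.1
      obtain ⟨hmi, hqi1, _⟩ := div_pair hg hidvd hi1
      obtain ⟨hmj, hqj1, _⟩ := div_pair hg hjdvd hj1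
      by_contra hle; push Not at hle
      nlinarith
    · intro x hx y hy
      rw [List.mem_reverse] at hy
      have h1 := hsmall x hx
      have h2 := hlarge y hy
      omega
  have hnodupB := hpairB.imp (fun {a b} h => ne_of_lt h)
  have hnodupA : (List.filter (fun d => decide (d ≤ mk))
      (PySem.Set.inter (PySem.Set.ofList (get_divisors nk))
        (PySem.Set.ofList (get_divisors np)))).Nodup :=
    List.Nodup.filter _ (PySem.Set.nodup_inter _ _ (PySem.Set.nodup_ofList _))
  apply PySem.List.sorted_eq_of_perm_of_pairwise_lt
  · rw [List.perm_ext_iff_of_nodup hnodupB hnodupA]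
    intro d
    rw [hmemA d, hmemB d]
  · exact hpairB

theorem main_eq (num_kpoints num_procs : Int) (max_kpar : Option Int) :
    generate_kpar_values num_kpoints num_procs max_kpar
      = generate_kpar_values_alt num_kpoints num_procs max_kpar := by
  by_cases h : num_kpoints ≤ 0 ∨ num_procs ≤ 0
  · simp [generate_kpar_values, generate_kpar_values_alt, h]
  · push Not at h
    rw [generate_kpar_values, generate_kpar_values_alt,
      if_neg (by omega : ¬ (num_kpoints ≤ 0 ∨ num_procs ≤ 0)),
      if_neg (by omega : ¬ (num_kpoints ≤ 0 ∨ num_procs ≤ 0))]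
    simp only [bfold_eq, List.nil_append]
    rw [kv_eq num_kpoints num_procs (max_kpar.getD (min num_kpoints num_procs)) h.1 h.2]

-- ===== VERDICT (by name: the statement is the Claim_ definition above) =====
theorem generate_kpar_values_spec : Claim_equal_generate_kpar_values := by
  intro nk np mk _
  exact main_eq nk np mk
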